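-- pv_equiv track=rewrite | github.com/Endimionx/top5 | tab4.py | analyze_delay_per_position
-- ===== SOURCE A (Python) =====
-- def split_digits(num_str):
--     return [int(d) for d in str(num_str).zfill(4)]
--
-- def analyze_delay_per_position(data):
--     delays = [{d: 0 for d in range(10)} for _ in range(4)]
--     last_seen = [{d: -1 for d in range(10)} for _ in range(4)]
--
--     for idx, num in enumerate(data):
--         digits = split_digits(num)
--         for pos, d in enumerate(digits):
--             for digit in range(10):
--                 if digit == d:
--                     if last_seen[pos][digit] != -1:
--                         delays[pos][digit] = idx - last_seen[pos][digit]
--                     last_seen[pos][digit] = idx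
--     return delays
-- ===== SOURCE B (Python) =====
-- def split_digits(num_str):
--     return [int(d) for d in str(num_str).zfill(4)]
--
-- def analyze_delay_per_position(data):
--     # Phase 1: one pass over the data recording, per position and digit, the occurrence indices.
--     index = [{d: [] for d in range(10)} for _ in range(4)]
--     for idx, num in enumerate(data):
--         for pos, d in enumerate(split_digits(num)):
--             index[pos][d].append(idx)
--     # Phase 2: the delay is the gap between the last two recorded occurrences (0 otherwise).
--     return [{d: (row[d][-1] - row[d][-2] if len(row[d]) >= 2 else 0) for d in range(10)}
--             for row in index]
-- ===== Notes on version B (the rewrite author's own statement) =====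
-- stated objective: alternative
-- what changed: A updates delays/last_seen dicts incrementally, scanning all 10 digit values per position per item; B first builds a per-position per-digit occurrence-index in one pass, then reads each delay off as the gap between the last two recorded occurrences.
import Mathlib
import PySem

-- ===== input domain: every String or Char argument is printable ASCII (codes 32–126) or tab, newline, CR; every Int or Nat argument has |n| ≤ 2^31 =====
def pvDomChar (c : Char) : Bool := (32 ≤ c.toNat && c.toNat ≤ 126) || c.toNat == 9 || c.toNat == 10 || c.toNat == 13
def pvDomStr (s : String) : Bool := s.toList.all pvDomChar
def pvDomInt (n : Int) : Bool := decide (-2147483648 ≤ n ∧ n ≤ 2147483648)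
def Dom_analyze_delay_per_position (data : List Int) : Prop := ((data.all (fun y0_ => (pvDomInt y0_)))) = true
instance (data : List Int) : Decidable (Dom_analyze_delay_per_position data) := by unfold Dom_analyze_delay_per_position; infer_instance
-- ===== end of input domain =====

-- B replaces A's incremental last_seen/delays bookkeeping (with its scan over all 10 digits per
-- position) by an occurrence-index built in one pass, from which the final gaps are read off.

-- ===== PORT A =====
-- str(num_str).zfill(4), then int(d) for each character.  int(d) raises ValueError exactly where
-- PySem.Int.ofChars? is none (non-digit char, only reachable for negative num) — excluded by Pre_,
-- so the `.getD 0` default is never taken on admitted inputs.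
def split_digits (num_str : Int) : List Int :=
  (PySem.Chars.zfill (PySem.Int.toChars num_str) 4).map
    (fun c => (PySem.Int.ofChars? [c]).getD 0)

-- A's loop state: (delays, last_seen), each a list of 4 dicts keyed 0..9.
def AState : Type := List (PySem.Dict Int Int) × List (PySem.Dict Int Int)

-- the body of `if digit == d:` — Python reads last_seen[pos] / delays[pos]; for pos ≥ 4
-- (num ≥ 10000) that is an IndexError, excluded by Pre_ (there the pyGetD default and the
-- out-of-range List.set make this a no-op).  last_seen[pos][digit] is a dict lookup whose key
-- is always present on admitted inputs; ported as getD digit (-1).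
def updA (idx pos : Int) (st : AState) (digit : Int) : AState :=
  let row := PySem.List.pyGetD st.2 pos PySem.Dict.empty
  let delays :=
    if row.getD digit (-1) ≠ -1 then
      st.1.set pos.toNat
        ((PySem.List.pyGetD st.1 pos PySem.Dict.empty).insert digit
          (idx - row.getD digit (-1)))
    else st.1
  (delays, st.2.set pos.toNat (row.insert digit idx))

-- `for digit in range(10): if digit == d: …`
def bodyA_digit (idx pos d : Int) (st : AState) (digit : Int) : AState :=
  if digit == d then updA idx pos st digit else st

-- `for pos, d in enumerate(digits): …`
def bodyA_pos (idx : Int) (st : AState) (q : Int × Int) : AState :=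
  (PySem.List.pyRange 0 10 1).foldl (bodyA_digit idx q.1 q.2) st

-- `for idx, num in enumerate(data): digits = split_digits(num); …`
def bodyA_item (st : AState) (p : Int × Int) : AState :=
  (PySem.List.enumerate (split_digits p.2) 0).foldl (bodyA_pos p.1) st

def analyze_delay_per_position (data : List Int) : List (List (Int × Int)) :=
  let delays0 : List (PySem.Dict Int Int) :=
    (PySem.List.pyRange 0 4 1).map (fun _ =>
      (PySem.List.pyRange 0 10 1).foldl (fun dd d => dd.insert d 0) PySem.Dict.empty)
  let last0 : List (PySem.Dict Int Int) :=
    (PySem.List.pyRange 0 4 1).map (fun _ =>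
      (PySem.List.pyRange 0 10 1).foldl (fun dd d => dd.insert d (-1)) PySem.Dict.empty)
  ((PySem.List.enumerate data 0).foldl bodyA_item (delays0, last0)).1.map
    (fun dd => dd.items)

-- ===== PORT B =====
-- `index[pos][d].append(idx)` = Dict.modify d [] (· ++ [idx]) (the key is always present on
-- admitted inputs); index[pos] with pos ≥ 4 is Python's IndexError, excluded by Pre_.
def bodyB_pos (idx : Int) (index : List (PySem.Dict Int (List Int))) (q : Int × Int) :
    List (PySem.Dict Int (List Int)) :=
  index.set q.1.toNat
    ((PySem.List.pyGetD index q.1 PySem.Dict.empty).modify q.2 [] (fun occ => occ ++ [idx]))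

def bodyB_item (index : List (PySem.Dict Int (List Int))) (p : Int × Int) :
    List (PySem.Dict Int (List Int)) :=
  (PySem.List.enumerate (split_digits p.2) 0).foldl (bodyB_pos p.1) index

-- `{d: (row[d][-1] - row[d][-2] if len(row[d]) >= 2 else 0) for d in range(10)}`
-- (row[d][-1] / row[d][-2] are guarded by len ≥ 2, so pyGetD's default is never taken)
def gapRow (row : PySem.Dict Int (List Int)) : PySem.Dict Int Int :=
  (PySem.List.pyRange 0 10 1).foldl (fun dd d =>
    let occ := row.getD d []
    dd.insert d (if occ.length ≥ 2
      then PySem.List.pyGetD occ (-1) 0 - PySem.List.pyGetD occ (-2) 0 else 0))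
    PySem.Dict.empty

def analyze_delay_per_position_alt (data : List Int) : List (List (Int × Int)) :=
  let index0 : List (PySem.Dict Int (List Int)) :=
    (PySem.List.pyRange 0 4 1).map (fun _ =>
      (PySem.List.pyRange 0 10 1).foldl (fun dd d => dd.insert d []) PySem.Dict.empty)
  let index := (PySem.List.enumerate data 0).foldl bodyB_item index0
  index.map (fun row => (gapRow row).items)

-- ===== PRECONDITION & SPEC =====
-- Python A raises on every entry outside 0..9999: int('-') → ValueError for negative numbers,
-- last_seen[pos] → IndexError for numbers of 5 or more digits.  Pre_ is exactly A's domain.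
def Pre_analyze_delay_per_position (data : List Int) : Prop :=
  ∀ n ∈ data, 0 ≤ n ∧ n ≤ 9999
instance (data : List Int) : Decidable (Pre_analyze_delay_per_position data) := by
  unfold Pre_analyze_delay_per_position; infer_instance

def pvWitness_analyze_delay_per_position : List Int := [1234, 7, 1234, 17, 9999, 7]

def Spec_analyze_delay_per_position (data : List Int) (out : List (List (Int × Int))) : Prop := out = analyze_delay_per_position_alt data
instance (data : List Int) (out : List (List (Int × Int))) : Decidable (Spec_analyze_delay_per_position data out) := by unfold Spec_analyze_delay_per_position; infer_instance

-- ===== CLAIM (what is proved, stated in full; the proofs are below) =====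
def Claim_equal_analyze_delay_per_position : Prop := ∀ (data : List Int), Dom_analyze_delay_per_position data → Pre_analyze_delay_per_position data → Spec_analyze_delay_per_position data (analyze_delay_per_position data)

-- ===== LEMMAS AND PROOFS =====

-- the value int(c) computes for one character (0 on the impossible-on-Pre_ error case)
def charVal (c : Char) : Int := (PySem.Int.ofChars? [c]).getD 0

-- gap between the last two entries / last entry (-1 when none) of an occurrence list
def gapOf (occ : List Int) : Int :=
  if occ.length ≥ 2 then PySem.List.pyGetD occ (-1) 0 - PySem.List.pyGetD occ (-2) 0 else 0
def lastOf (occ : List Int) : Int := PySem.List.pyGetD occ (-1) (-1)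

-- a dict with keys 0..9 in order, value f d at key d
def mkRow {ν : Type} (f : Int → ν) : PySem.Dict Int ν :=
  (PySem.List.pyRange 0 10 1).foldl (fun dd d => dd.insert d (f d)) PySem.Dict.empty

-- abstract state, parametrised by the occurrence lists f pos d and a per-cell view G
def stG {ν : Type} (G : List Int → ν) (f : Nat → Int → List Int) : List (PySem.Dict Int ν) :=
  (List.range 4).map (fun pos => mkRow (fun d => G (f pos d)))

def upd (f : Nat → Int → List Int) (p : Nat) (d0 i : Int) : Nat → Int → List Int :=
  fun pos d => if pos = p ∧ d = d0 then f pos d ++ [i] else f pos d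

def ext1 (f : Nat → Int → List Int) (digits : List Int) (i : Int) : Nat → Int → List Int :=
  fun pos d => f pos d ++ (if digits[pos]? = some d then [i] else [])

def occAll (data : List Int) (s : Int) : Nat → Int → List Int := fun pos d =>
  (PySem.List.enumerate data s).filterMap
    (fun p => if (split_digits p.2)[pos]? = some d then some p.1 else none)

def Good (f : Nat → Int → List Int) : Prop := ∀ p d x, x ∈ f p d → 0 ≤ x

-- ---- generic row/list lemmas ----

lemma mkRow_items {ν : Type} (f : Int → ν) :
    (mkRow f).items = (PySem.List.pyRange 0 10 1).map (fun d => (d, f d)) := by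
  have h := PySem.Dict.items_foldl_insert_fresh (PySem.List.pyRange 0 10 1)
      (fun a => a) f PySem.Dict.empty (fun a _ => rfl) (by decide)
  simpa [mkRow] using h

lemma mkRow_keys {ν : Type} (f : Int → ν) :
    (mkRow f).keys = PySem.List.pyRange 0 10 1 := by
  rw [PySem.Dict.keys, mkRow_items]; simp [Function.comp_def]

lemma mkRow_get? {ν : Type} (f : Int → ν) (d : Int) (h : 0 ≤ d ∧ d < 10) :
    (mkRow f).get? d = some (f d) := by
  apply PySem.Dict.get?_of_mem_items
  · rw [mkRow_items]
    exact List.mem_map.2 ⟨d, by rw [PySem.List.mem_pyRange_one]; omega, rfl⟩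
  · rw [mkRow_keys]; decide

lemma mkRow_getD {ν : Type} (f : Int → ν) (d : Int) (h : 0 ≤ d ∧ d < 10) (dflt : ν) :
    (mkRow f).getD d dflt = f d := by
  rw [PySem.Dict.getD_eq_get?_getD, mkRow_get? f d h]; rfl

lemma mkRow_insert {ν : Type} (f : Int → ν) (d0 : Int) (h : 0 ≤ d0 ∧ d0 < 10) (v : ν) :
    (mkRow f).insert d0 v = mkRow (fun d => if d = d0 then v else f d) := by
  apply PySem.Dict.ext
  rw [PySem.Dict.items_insert_of_contains, mkRow_items, mkRow_items, List.map_map]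
  · apply List.map_congr_left
    intro d hd
    by_cases hdd : d = d0 <;> simp [hdd]
  · rw [PySem.Dict.contains_iff_mem_keys, mkRow_keys, PySem.List.mem_pyRange_one]; omega

lemma mkRow_congr {ν : Type} (f g : Int → ν) (h : ∀ d, 0 ≤ d → d < 10 → f d = g d) :
    mkRow f = mkRow g := by
  unfold mkRow
  apply PySem.List.foldl_congr_mem
  intro acc x hx
  rw [PySem.List.mem_pyRange_one] at hx
  rw [h x (by omega) (by omega)]

lemma set_map_range {α : Type} (n : Nat) (g : Nat → α) (p : Nat) (v : α) :
    ((List.range n).map g).set p v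
      = (List.range n).map (fun q => if q = p then v else g q) := by
  apply List.ext_getElem (by simp)
  intro i h1 h2
  simp only [List.getElem_set, List.getElem_map, List.getElem_range]
  by_cases hip : i = p
  · simp [hip]
  · rw [if_neg hip, if_neg (mt Eq.symm hip)]

lemma pyGetD_map_range {α : Type} (n : Nat) (g : Nat → α) (p : Nat) (hp : p < n) (dflt : α) :
    PySem.List.pyGetD ((List.range n).map g) (p : Int) dflt = g p := by
  rw [PySem.List.pyGetD_natCast]
  simp [hp]

lemma pyGetD_back (occ : List Int) (i : Int) (dflt : Int) :
    PySem.List.pyGetD (occ ++ [i]) (-1) dflt = i := by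
  simp [PySem.List.pyGetD, PySem.List.pyGet?, PySem.List.pyIdx?]

lemma pyGetD_back2 (occ : List Int) (i : Int) (h : occ ≠ []) (dflt : Int) :
    PySem.List.pyGetD (occ ++ [i]) (-2) dflt = PySem.List.pyGetD occ (-1) dflt := by
  have hl : 0 < occ.length := List.length_pos_iff.2 h
  simp only [PySem.List.pyGetD, PySem.List.pyGet?, PySem.List.pyIdx?, List.length_append]
  norm_num
  rw [if_pos (by omega), if_pos (by omega)]
  simp only [Option.bind_some]
  rw [(by omega : occ.length + 1 - Int.toNat 2 = occ.length - 1),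
      List.getElem?_append_left (by omega)]

lemma pyGetD_last (occ : List Int) (h : occ ≠ []) (d1 d2 : Int) :
    PySem.List.pyGetD occ (-1) d1 = PySem.List.pyGetD occ (-1) d2 := by
  rcases List.eq_nil_or_concat occ with h' | ⟨ys, y, rfl⟩
  · exact absurd h' h
  · rw [List.concat_eq_append] at *
    rw [pyGetD_back, pyGetD_back]

lemma lastOf_append (occ : List Int) (i : Int) : lastOf (occ ++ [i]) = i := by
  simp [lastOf]

lemma gapOf_append (occ : List Int) (i : Int) :
    gapOf (occ ++ [i]) = if occ = [] then 0 else i - lastOf occ := by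
  by_cases h : occ = []
  · simp [h, gapOf]
  · have hl : 0 < occ.length := List.length_pos_iff.2 h
    rw [gapOf, if_pos (by simp; omega), pyGetD_back, pyGetD_back2 occ i h, if_neg h,
        pyGetD_last occ h 0 (-1)]
    rfl

lemma lastOf_eq_neg_one (occ : List Int) (h : ∀ x ∈ occ, 0 ≤ x) :
    lastOf occ = -1 ↔ occ = [] := by
  constructor
  · intro hl
    by_contra hne
    rcases List.eq_nil_or_concat occ with h' | ⟨ys, y, rfl⟩
    · exact hne h'
    · rw [List.concat_eq_append] at *
      rw [lastOf_append] at hl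
      have := h y (by simp)
      omega
  · intro h; subst h; rfl

-- ---- split_digits facts ----

lemma toDigitsCore_mem (f : Nat) : ∀ (n : Nat) (acc : List Char) (c : Char),
    c ∈ Nat.toDigitsCore 10 f n acc → (∃ k, k < 10 ∧ c = Nat.digitChar k) ∨ c ∈ acc := by
  induction f with
  | zero => intro n acc c h; exact Or.inr h
  | succ f ih =>
    intro n acc c h
    rw [Nat.toDigitsCore] at h
    by_cases hb : n / 10 = 0
    · rw [if_pos hb] at h
      rcases List.mem_cons.1 h with h | h
      · exact Or.inl ⟨n % 10, Nat.mod_lt _ (by norm_num), h⟩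
      · exact Or.inr h
    · rw [if_neg hb] at h
      rcases ih (n / 10) _ c h with h | h
      · exact Or.inl h
      · rcases List.mem_cons.1 h with h | h
        · exact Or.inl ⟨n % 10, Nat.mod_lt _ (by norm_num), h⟩
        · exact Or.inr h

lemma mem_zfill (cs : List Char) (w : Int) (c : Char) (h : c ∈ PySem.Chars.zfill cs w) :
    c = '0' ∨ c ∈ cs := by
  rw [PySem.Chars.zfill.eq_def] at h
  split at h
  · exact Or.inr h
  · split at h
    next c0 rest =>
      split at h
      · rcases List.mem_cons.1 h with h | h
        · exact Or.inr (h ▸ List.mem_cons_self)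
        · rcases List.mem_append.1 h with h | h
          · exact Or.inl (List.eq_of_mem_replicate h)
          · exact Or.inr (List.mem_cons_of_mem _ h)
      · rcases List.mem_append.1 h with h | h
        · exact Or.inl (List.eq_of_mem_replicate h)
        · exact Or.inr h
    next => exact Or.inl (List.eq_of_mem_replicate h)

lemma charVal_digitChar (k : Nat) (hk : k < 10) :
    0 ≤ charVal (Nat.digitChar k) ∧ charVal (Nat.digitChar k) < 10 := by
  interval_cases k <;> decide

lemma toChars_nonneg (n : Int) (h0 : 0 ≤ n) :
    PySem.Int.toChars n = Nat.toDigits 10 n.toNat := by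
  rw [PySem.Int.toChars, if_neg (by omega)]

lemma split_digits_length (n : Int) (h0 : 0 ≤ n) (h1 : n ≤ 9999) :
    (split_digits n).length = 4 := by
  rw [split_digits, List.length_map, PySem.Chars.length_zfill, toChars_nonneg n h0]
  have := Nat.toDigits_length 10 n.toNat 4 (by norm_num) (by omega)
  omega

lemma split_digits_mem (n : Int) (h0 : 0 ≤ n) :
    ∀ d ∈ split_digits n, 0 ≤ d ∧ d < 10 := by
  intro d hd
  rw [split_digits] at hd
  obtain ⟨c, hc, rfl⟩ := List.mem_map.1 hd
  rcases mem_zfill _ _ _ hc with h | h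
  · subst h; constructor <;> decide
  · rw [toChars_nonneg n h0] at h
    rcases toDigitsCore_mem _ _ _ _ h with ⟨k, hk, rfl⟩ | h
    · exact charVal_digitChar k hk
    · simp at h

-- ---- generic state lemmas ----

lemma stG_get {ν : Type} (G : List Int → ν) (f : Nat → Int → List Int) (p : Nat) (hp : p < 4) :
    PySem.List.pyGetD (stG G f) (p : Int) PySem.Dict.empty = mkRow (fun d => G (f p d)) :=
  pyGetD_map_range 4 _ p hp _

lemma stG_set {ν : Type} (G : List Int → ν) (f : Nat → Int → List Int) (p : Nat) (hp : p < 4)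
    (d0 : Int) (hd0 : 0 ≤ d0 ∧ d0 < 10) (i : Int) (w : ν) (hw : w = G (f p d0 ++ [i])) :
    (stG G f).set p ((mkRow (fun d => G (f p d))).insert d0 w) = stG G (upd f p d0 i) := by
  rw [mkRow_insert _ d0 hd0, stG, set_map_range, stG]
  apply List.map_congr_left
  intro q hq
  by_cases hqp : q = p
  · subst hqp
    rw [if_pos rfl]
    apply mkRow_congr
    intro d h0 h10
    by_cases hdd : d = d0
    · subst hdd
      rw [if_pos rfl, hw]
      unfold upd
      rw [if_pos ⟨rfl, rfl⟩]
    · rw [if_neg hdd]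
      unfold upd
      rw [if_neg (by tauto)]
  · rw [if_neg hqp]
    apply mkRow_congr
    intro d _ _
    unfold upd
    rw [if_neg (by tauto)]

lemma stG_unch {ν : Type} (G : List Int → ν) (f : Nat → Int → List Int) (p : Nat)
    (d0 i : Int) (hsame : G (f p d0 ++ [i]) = G (f p d0)) :
    stG G f = stG G (upd f p d0 i) := by
  unfold stG
  apply List.map_congr_left
  intro q _
  apply mkRow_congr
  intro d _ _
  unfold upd
  by_cases hc : q = p ∧ d = d0
  · rw [if_pos hc, hc.1, hc.2, hsame]
  · rw [if_neg hc]

-- ---- A-side fold characterisation ----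

lemma updA_state (f : Nat → Int → List Int) (hf : Good f) (p : Nat) (hp : p < 4)
    (d0 : Int) (hd0 : 0 ≤ d0 ∧ d0 < 10) (i : Int) :
    updA i (p : Int) (stG gapOf f, stG lastOf f) d0
      = (stG gapOf (upd f p d0 i), stG lastOf (upd f p d0 i)) := by
  simp only [updA]
  rw [stG_get lastOf f p hp, mkRow_getD _ d0 hd0, Int.toNat_natCast,
      stG_get gapOf f p hp]
  by_cases hocc : f p d0 = []
  · rw [if_neg (by rw [hocc]; simp [lastOf, PySem.List.pyGetD, PySem.List.pyGet?,
        PySem.List.pyIdx?])]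
    refine Prod.ext ?_ ?_
    · exact stG_unch gapOf f p d0 i (by rw [gapOf_append, if_pos hocc, hocc]; rfl)
    · exact stG_set lastOf f p hp d0 hd0 i i (lastOf_append _ _).symm
  · have hne : lastOf (f p d0) ≠ -1 := fun h => hocc ((lastOf_eq_neg_one _ (hf p d0)).1 h)
    rw [if_pos hne]
    refine Prod.ext ?_ ?_
    · exact stG_set gapOf f p hp d0 hd0 i _
        (by rw [gapOf_append, if_neg hocc])
    · exact stG_set lastOf f p hp d0 hd0 i i (lastOf_append _ _).symm

lemma scanA (f : Nat → Int → List Int) (hf : Good f) (p : Nat) (hp : p < 4)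
    (d0 : Int) (hd0 : 0 ≤ d0 ∧ d0 < 10) (i : Int) :
    (PySem.List.pyRange 0 10 1).foldl (bodyA_digit i (p : Int) d0) (stG gapOf f, stG lastOf f)
      = (stG gapOf (upd f p d0 i), stG lastOf (upd f p d0 i)) := by
  have hb : bodyA_digit i (p : Int) d0
      = fun st digit => if digit == d0 then updA i (p : Int) st digit else st := rfl
  rw [hb, PySem.List.foldl_if_eq_foldl_filter, List.filter_beq,
      List.count_eq_one_of_mem (by decide) (by rw [PySem.List.mem_pyRange_one]; omega)]
  simp only [List.replicate, List.foldl_cons, List.foldl_nil]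
  exact updA_state f hf p hp d0 hd0 i

lemma upd_good (f : Nat → Int → List Int) (hf : Good f) (p : Nat) (d0 i : Int) (hi : 0 ≤ i) :
    Good (upd f p d0 i) := by
  intro q d x hx
  unfold upd at hx
  split at hx
  · rcases List.mem_append.1 hx with h | h
    · exact hf q d x h
    · simp at h; omega
  · exact hf q d x hx

lemma upd4_eq_ext1 (f : Nat → Int → List Int) (a b c e i : Int) :
    upd (upd (upd (upd f 0 a i) 1 b i) 2 c i) 3 e i = ext1 f [a, b, c, e] i := by
  funext pos d
  unfold upd ext1
  match pos with
  | 0 => by_cases h : d = a <;> simp [h, eq_comm] <;> omega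
  | 1 => by_cases h : d = b <;> simp [h, eq_comm] <;> omega
  | 2 => by_cases h : d = c <;> simp [h, eq_comm] <;> omega
  | 3 => by_cases h : d = e <;> simp [h, eq_comm] <;> omega
  | (n + 4) => simp

lemma scanA' (f : Nat → Int → List Int) (hf : Good f) (pos : Int) (hp : 0 ≤ pos ∧ pos < 4)
    (d0 : Int) (hd0 : 0 ≤ d0 ∧ d0 < 10) (i : Int) :
    (PySem.List.pyRange 0 10 1).foldl (bodyA_digit i pos d0) (stG gapOf f, stG lastOf f)
      = (stG gapOf (upd f pos.toNat d0 i), stG lastOf (upd f pos.toNat d0 i)) := by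
  obtain ⟨p, rfl⟩ := Int.eq_ofNat_of_zero_le hp.1
  rw [Int.toNat_natCast]
  exact scanA f hf p (by exact_mod_cast hp.2) d0 hd0 i

lemma itemA (f : Nat → Int → List Int) (hf : Good f) (i num : Int) (hi : 0 ≤ i) (h0 : 0 ≤ num)
    (h1 : num ≤ 9999) :
    bodyA_item (stG gapOf f, stG lastOf f) (i, num)
      = (stG gapOf (ext1 f (split_digits num) i), stG lastOf (ext1 f (split_digits num) i)) := by
  have hlen := split_digits_length num h0 h1
  have hmem := split_digits_mem num h0
  rcases hsd : split_digits num with _ | ⟨a, _ | ⟨b, _ | ⟨c, _ | ⟨e, rest⟩⟩⟩⟩ <;>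
    rw [hsd] at hlen <;> simp at hlen
  subst hlen
  rw [hsd] at hmem
  have ha := hmem a (by simp)
  have hb := hmem b (by simp)
  have hc := hmem c (by simp)
  have he := hmem e (by simp)
  simp only [bodyA_item, hsd, PySem.List.enumerate_cons, PySem.List.enumerate_nil]
  norm_num
  simp only [bodyA_pos]
  have hf1 := upd_good f hf 0 a i hi
  have hf2 := upd_good _ hf1 1 b i hi
  have hf3 := upd_good _ hf2 2 c i hi
  rw [scanA' f hf 0 (by omega) a ha i]
  norm_num
  rw [scanA' _ hf1 1 (by omega) b hb i]
  norm_num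
  rw [scanA' _ hf2 2 (by omega) c hc i]
  simp only [show (2 : Int).toNat = 2 from rfl]
  rw [scanA' _ hf3 3 (by omega) e he i]
  simp only [show (3 : Int).toNat = 3 from rfl]
  rw [upd4_eq_ext1]

lemma ext1_good (f : Nat → Int → List Int) (hf : Good f) (digits : List Int) (i : Int)
    (hi : 0 ≤ i) : Good (ext1 f digits i) := by
  intro q d x hx
  unfold ext1 at hx
  rcases List.mem_append.1 hx with h | h
  · exact hf q d x h
  · split at h <;> simp at h
    omega

lemma occAll_cons (x : Int) (xs : List Int) (s : Int) (pos : Nat) (d : Int) :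
    occAll (x :: xs) s pos d
      = (if (split_digits x)[pos]? = some d then [s] else []) ++ occAll xs (s + 1) pos d := by
  unfold occAll
  rw [PySem.List.enumerate_cons, List.filterMap_cons]
  by_cases hc : (split_digits x)[pos]? = some d
  · rw [if_pos (by simpa using hc)]
    simp [hc]
  · rw [if_neg (by simpa using hc)]
    simp [hc]

lemma foldA (data : List Int) :
    ∀ (s : Int) (f : Nat → Int → List Int), Good f → 0 ≤ s →
    (∀ n ∈ data, 0 ≤ n ∧ n ≤ 9999) →
    (PySem.List.enumerate data s).foldl bodyA_item (stG gapOf f, stG lastOf f)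
      = (stG gapOf (fun pos d => f pos d ++ occAll data s pos d),
         stG lastOf (fun pos d => f pos d ++ occAll data s pos d)) := by
  induction data with
  | nil =>
    intro s f hf hs _
    have hfun : (fun pos d => f pos d ++ occAll [] s pos d) = f := by
      funext pos d
      simp [occAll, PySem.List.enumerate_nil]
    rw [PySem.List.enumerate_nil, List.foldl_nil, hfun]
  | cons x xs ih =>
    intro s f hf hs hdata
    rw [PySem.List.enumerate_cons, List.foldl_cons,
        itemA f hf s x hs (hdata x List.mem_cons_self).1 (hdata x List.mem_cons_self).2,
        ih (s + 1) _ (ext1_good f hf _ s hs) (by omega)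
          (fun n hn => hdata n (List.mem_cons_of_mem _ hn))]
    have hfun : (fun pos d => ext1 f (split_digits x) s pos d ++ occAll xs (s + 1) pos d)
        = (fun pos d => f pos d ++ occAll (x :: xs) s pos d) := by
      funext pos d
      rw [occAll_cons, ext1, List.append_assoc]
    rw [hfun]

-- ---- B-side fold characterisation ----

lemma itemB_one (f : Nat → Int → List Int) (p : Nat) (hp : p < 4)
    (d0 : Int) (hd0 : 0 ≤ d0 ∧ d0 < 10) (i : Int) :
    bodyB_pos i (stG (fun occ => occ) f) ((p : Int), d0)
      = stG (fun occ => occ) (upd f p d0 i) := by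
  simp only [bodyB_pos, PySem.Dict.modify, Int.toNat_natCast]
  rw [stG_get (fun occ => occ) f p hp, mkRow_getD _ d0 hd0]
  exact stG_set (fun occ => occ) f p hp d0 hd0 i _ rfl

lemma itemB_one' (f : Nat → Int → List Int) (pos : Int) (hp : 0 ≤ pos ∧ pos < 4)
    (d0 : Int) (hd0 : 0 ≤ d0 ∧ d0 < 10) (i : Int) :
    bodyB_pos i (stG (fun occ => occ) f) (pos, d0)
      = stG (fun occ => occ) (upd f pos.toNat d0 i) := by
  obtain ⟨p, rfl⟩ := Int.eq_ofNat_of_zero_le hp.1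
  rw [Int.toNat_natCast]
  exact itemB_one f p (by exact_mod_cast hp.2) d0 hd0 i

lemma itemB (f : Nat → Int → List Int) (i num : Int) (h0 : 0 ≤ num) (h1 : num ≤ 9999) :
    bodyB_item (stG (fun occ => occ) f) (i, num)
      = stG (fun occ => occ) (ext1 f (split_digits num) i) := by
  have hlen := split_digits_length num h0 h1
  have hmem := split_digits_mem num h0
  rcases hsd : split_digits num with _ | ⟨a, _ | ⟨b, _ | ⟨c, _ | ⟨e, rest⟩⟩⟩⟩ <;>
    rw [hsd] at hlen <;> simp at hlen
  subst hlen
  rw [hsd] at hmem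
  simp only [bodyB_item, hsd, PySem.List.enumerate_cons, PySem.List.enumerate_nil]
  norm_num
  rw [itemB_one' f 0 (by omega) a (hmem a (by simp)) i]
  norm_num
  rw [itemB_one' _ 1 (by omega) b (hmem b (by simp)) i]
  norm_num
  rw [itemB_one' _ 2 (by omega) c (hmem c (by simp)) i]
  simp only [show (2 : Int).toNat = 2 from rfl]
  rw [itemB_one' _ 3 (by omega) e (hmem e (by simp)) i]
  simp only [show (3 : Int).toNat = 3 from rfl]
  rw [upd4_eq_ext1]

lemma foldB (data : List Int) :
    ∀ (s : Int) (f : Nat → Int → List Int), (∀ n ∈ data, 0 ≤ n ∧ n ≤ 9999) →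
    (PySem.List.enumerate data s).foldl bodyB_item (stG (fun occ => occ) f)
      = stG (fun occ => occ) (fun pos d => f pos d ++ occAll data s pos d) := by
  induction data with
  | nil =>
    intro s f _
    have hfun : (fun pos d => f pos d ++ occAll [] s pos d) = f := by
      funext pos d
      simp [occAll, PySem.List.enumerate_nil]
    rw [PySem.List.enumerate_nil, List.foldl_nil, hfun]
  | cons x xs ih =>
    intro s f hdata
    rw [PySem.List.enumerate_cons, List.foldl_cons,
        itemB f s x (hdata x List.mem_cons_self).1 (hdata x List.mem_cons_self).2,
        ih (s + 1) _ (fun n hn => hdata n (List.mem_cons_of_mem _ hn))]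
    have hfun : (fun pos d => ext1 f (split_digits x) s pos d ++ occAll xs (s + 1) pos d)
        = (fun pos d => f pos d ++ occAll (x :: xs) s pos d) := by
      funext pos d
      rw [occAll_cons, ext1, List.append_assoc]
    rw [hfun]

lemma gapRow_mkRow (g : Int → List Int) :
    gapRow (mkRow g) = mkRow (fun d => gapOf (g d)) := by
  unfold gapRow mkRow
  apply PySem.List.foldl_congr_mem
  intro acc x hx
  rw [PySem.List.mem_pyRange_one] at hx
  show acc.insert x _ = acc.insert x _
  rw [show (List.foldl (fun dd d => dd.insert d (g d)) PySem.Dict.empty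
        (PySem.List.pyRange 0 10)).getD x [] = (mkRow g).getD x [] from rfl,
      mkRow_getD g x (by omega)]
  rfl

-- ---- putting it together ----

lemma A_eq (data : List Int) (hdata : ∀ n ∈ data, 0 ≤ n ∧ n ≤ 9999) :
    analyze_delay_per_position data
      = (List.range 4).map (fun pos => (mkRow (fun d => gapOf (occAll data 0 pos d))).items) := by
  show (List.map (fun dd => dd.items)
      (List.foldl bodyA_item
        (((PySem.List.pyRange 0 4 1).map (fun _ =>
            (PySem.List.pyRange 0 10 1).foldl (fun dd d => dd.insert d 0) PySem.Dict.empty)),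
         ((PySem.List.pyRange 0 4 1).map (fun _ =>
            (PySem.List.pyRange 0 10 1).foldl (fun dd d => dd.insert d (-1)) PySem.Dict.empty)))
        (PySem.List.enumerate data 0)).1) = _
  have hinit :
      (((PySem.List.pyRange 0 4 1).map (fun _ =>
          (PySem.List.pyRange 0 10 1).foldl (fun dd d => dd.insert d 0) PySem.Dict.empty)),
       ((PySem.List.pyRange 0 4 1).map (fun _ =>
          (PySem.List.pyRange 0 10 1).foldl (fun dd d => dd.insert d (-1)) PySem.Dict.empty)))
      = (stG gapOf (fun _ _ => []), stG lastOf (fun _ _ => [])) := by decide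
  rw [hinit, foldA data 0 (fun _ _ => []) (fun _ _ _ h => absurd h List.not_mem_nil)
      le_rfl hdata]
  unfold stG
  rw [List.map_map]
  apply List.map_congr_left
  intro pos _
  simp

lemma B_eq (data : List Int) (hdata : ∀ n ∈ data, 0 ≤ n ∧ n ≤ 9999) :
    analyze_delay_per_position_alt data
      = (List.range 4).map (fun pos => (mkRow (fun d => gapOf (occAll data 0 pos d))).items) := by
  show (List.map (fun row => (gapRow row).items)
      (List.foldl bodyB_item
        ((PySem.List.pyRange 0 4 1).map (fun _ =>
            (PySem.List.pyRange 0 10 1).foldl (fun dd d => dd.insert d []) PySem.Dict.empty))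
        (PySem.List.enumerate data 0))) = _
  have hinit :
      ((PySem.List.pyRange 0 4 1).map (fun _ =>
          (PySem.List.pyRange 0 10 1).foldl (fun dd d => dd.insert d []) PySem.Dict.empty))
      = stG (fun occ => occ) (fun _ _ => []) := by decide
  rw [hinit, foldB data 0 (fun _ _ => []) hdata]
  unfold stG
  rw [List.map_map]
  apply List.map_congr_left
  intro pos _
  simp only [Function.comp_apply, List.nil_append]
  rw [gapRow_mkRow]

-- ===== VERDICT (by name: the statement is the Claim_ definition above) =====
theorem analyze_delay_per_position_spec : Claim_equal_analyze_delay_per_position := by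
  intro data _ hpre
  unfold Spec_analyze_delay_per_position
  rw [A_eq data hpre, B_eq data hpre]
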